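-- pv_equiv track=rewrite | github.com/jjuraska/slug2slug | e2e_nlg/stylistic_selection.py | find_agreement
-- ===== SOURCE A (Python) =====
-- def find_agreement(ptree):
--     agreement_tags = ['(ADVP (RB too))'.lower(),
--                       '(ADVP (RB as) (RB well))'.lower(),
--                       '(CONJP (RB as) (RB well) (IN as))'.lower(),
--                       '(DT both)'.lower(),
--                       '(DT either)'.lower(),
--                       '(DT neither)'.lower(),
--                       '(DT nor)'.lower(),
--                       '(RB also)'.lower()]
--
--     for line in ptree:
--         line = line.lower()
--         for agreement_tag in agreement_tags:
--             if agreement_tag in line: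
--                 return True
--
--     return False
-- ===== SOURCE B (Python) =====
-- _AGREEMENT_TAGS = ('(advp (rb too))',
--                    '(advp (rb as) (rb well))',
--                    '(conjp (rb as) (rb well) (in as))',
--                    '(dt both)',
--                    '(dt either)',
--                    '(dt neither)',
--                    '(dt nor)',
--                    '(rb also)')
--
--
-- def find_agreement(ptree):
--     # Single left-to-right scan of each line: every tag starts with '(',
--     # so only positions holding '(' can start a match.
--     for line in ptree:
--         low = line.lower()
--         for i in range(len(low)):
--             if low[i] == '(' and any(low.startswith(t, i) for t in _AGREEMENT_TAGS):
--                 return True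
--     return False
-- ===== Notes on version B (the rewrite author's own statement) =====
-- stated objective: alternative
-- what changed: B replaces A's per-line loop over 8 separate 'tag in line' substring searches with a single left-to-right scan of each line that tests the 8 tag prefixes only at positions holding '(', the common first character of every tag.
import Mathlib
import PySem

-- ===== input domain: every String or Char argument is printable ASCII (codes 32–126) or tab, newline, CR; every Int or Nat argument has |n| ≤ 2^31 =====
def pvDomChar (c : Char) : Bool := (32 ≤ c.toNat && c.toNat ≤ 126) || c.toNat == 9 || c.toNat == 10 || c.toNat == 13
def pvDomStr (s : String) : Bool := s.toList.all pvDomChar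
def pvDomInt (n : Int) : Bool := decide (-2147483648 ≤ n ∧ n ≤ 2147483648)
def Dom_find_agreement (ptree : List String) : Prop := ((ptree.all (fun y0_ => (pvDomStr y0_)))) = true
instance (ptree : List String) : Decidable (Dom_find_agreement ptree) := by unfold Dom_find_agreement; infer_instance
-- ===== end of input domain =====

-- B changes A's 8-substring-searches-per-line into one positional scan per line testing tags only at '(' positions (objective: alternative).

-- ===== PORT A =====
-- the agreement_tags list of A (literals already lowercased, as .lower() of the ASCII literals yields)
def agreementTags : List (List Char) :=
  ["(advp (rb too))".toList,
   "(advp (rb as) (rb well))".toList,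
   "(conjp (rb as) (rb well) (in as))".toList,
   "(dt both)".toList,
   "(dt either)".toList,
   "(dt neither)".toList,
   "(dt nor)".toList,
   "(rb also)".toList]

-- inner 'for agreement_tag in agreement_tags: if tag in line: return True'
def find_agreement (ptree : List String) : Bool :=
  match ptree with
  | [] => false
  | s :: rest =>
    let low := PySem.Chars.lower s.toList
    if agreementTags.any (fun t => PySem.Chars.isIn t low) then true
    else find_agreement rest

-- ===== PORT B =====
-- 'for i in range(len(low)): if low[i] == "(" and any(low.startswith(t, i) ...)' as recursion over suffixes
def scanLine (cs : List Char) : Bool :=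
  match cs with
  | [] => false
  | c :: rest =>
    ((c == '(') && agreementTags.any (fun t => PySem.Chars.startswith (c :: rest) t))
    || scanLine rest

def find_agreement_alt (ptree : List String) : Bool :=
  match ptree with
  | [] => false
  | s :: rest =>
    let low := PySem.Chars.lower s.toList
    if scanLine low then true else find_agreement_alt rest

-- ===== PRECONDITION & SPEC =====
def Spec_find_agreement (ptree : List String) (out : Bool) : Prop := out = find_agreement_alt ptree
instance (ptree : List String) (out : Bool) : Decidable (Spec_find_agreement ptree out) := by unfold Spec_find_agreement; infer_instance

-- ===== CLAIM (what is proved, stated in full; the proofs are below) =====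
def Claim_equal_find_agreement : Prop := ∀ (ptree : List String), Dom_find_agreement ptree → Spec_find_agreement ptree (find_agreement ptree)

-- ===== LEMMAS AND PROOFS =====

-- every tag starts with '('
lemma tags_head : ∀ t ∈ agreementTags, t.head? = some '(' := by decide

lemma scanLine_iff (cs : List Char) :
    scanLine cs = true ↔ ∃ t ∈ agreementTags, ∃ j, t <+: cs.drop j := by
  induction cs with
  | nil =>
    simp only [scanLine]
    constructor
    · intro h; cases h
    · rintro ⟨t, ht, j, hpre⟩
      have := tags_head t ht
      simp only [List.drop_nil] at hpre
      rcases t with _ | ⟨a, t'⟩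
      · simp at this
      · rcases hpre with ⟨u, hu⟩; cases hu
  | cons c rest ih =>
    simp only [scanLine, Bool.or_eq_true, Bool.and_eq_true, List.any_eq_true, beq_iff_eq, ih]
    constructor
    · rintro (⟨hc, t, ht, hsw⟩ | ⟨t, ht, j, hpre⟩)
      · exact ⟨t, ht, 0, by
          have := (PySem.Chars.startswith_iff (c :: rest) t).mp hsw
          simpa using this⟩
      · exact ⟨t, ht, j + 1, by simpa using hpre⟩
    · rintro ⟨t, ht, j, hpre⟩
      cases j with
      | zero =>
        left
        simp only [List.drop_zero] at hpre
        have hc : c = '(' := by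
          have hh := tags_head t ht
          rcases t with _ | ⟨a, t'⟩
          · simp at hh
          · simp only [List.head?, Option.some.injEq] at hh
            rcases hpre with ⟨u, hu⟩
            injection hu with h1 _
            rw [← h1, hh]
        exact ⟨hc, t, ht, (PySem.Chars.startswith_iff (c :: rest) t).mpr hpre⟩
      | succ j' =>
        right; exact ⟨t, ht, j', by simpa using hpre⟩

lemma scanLine_eq_any (cs : List Char) :
    scanLine cs = agreementTags.any (fun t => PySem.Chars.isIn t cs) := by
  rw [Bool.eq_iff_iff, scanLine_iff]
  simp only [List.any_eq_true]
  constructor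
  · rintro ⟨t, ht, j, hpre⟩
    exact ⟨t, ht, (PySem.Chars.exists_prefix_drop_iff_isIn t cs).mp ⟨j, hpre⟩⟩
  · rintro ⟨t, ht, hin⟩
    obtain ⟨j, hpre⟩ := (PySem.Chars.exists_prefix_drop_iff_isIn t cs).mpr hin
    exact ⟨t, ht, j, hpre⟩

-- ===== VERDICT (by name: the statement is the Claim_ definition above) =====
theorem find_agreement_spec : Claim_equal_find_agreement := by
  intro ptree hdom
  unfold Spec_find_agreement
  induction ptree with
  | nil => rfl
  | cons s rest ih =>
    have hrest : Dom_find_agreement rest := by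
      unfold Dom_find_agreement at hdom ⊢
      simp only [List.all_cons, Bool.and_eq_true] at hdom
      exact hdom.2
    simp only [find_agreement, find_agreement_alt, scanLine_eq_any, ih hrest]
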